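-- pv_equiv track=rewrite | github.com/nyimbi/apg | capabilities/intel/crawler/search_crawler/keywords/keyword_analyzer.py | _has_conflict_context
-- ===== SOURCE A (Python) =====
-- from typing import Dict, List, Set, Tuple, Optional
--
-- def _has_conflict_context(contexts: List[str]) -> bool:
--     """Check if contexts contain conflict-related terms."""
--     conflict_indicators = {
--         'conflict', 'violence', 'attack', 'war', 'crisis', 'emergency',
--         'security', 'threat', 'danger', 'instability', 'unrest'
--     }
--
--     for context in contexts:
--         context_lower = context.lower()
--         if any(indicator in context_lower for indicator in conflict_indicators):
--             return True
--
--     return False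
-- ===== SOURCE B (Python) =====
-- _CONFLICT_WORDS = (
--     'conflict', 'violence', 'attack', 'war', 'crisis', 'emergency',
--     'security', 'threat', 'danger', 'instability', 'unrest'
-- )
--
-- # First-letter dispatch table: candidates grouped by their first character.
-- _BY_FIRST = {}
-- for _w in _CONFLICT_WORDS:
--     _BY_FIRST.setdefault(_w[0], []).append(_w)
--
--
-- def _has_conflict_context(contexts):
--     """Check if contexts contain conflict-related terms."""
--     for context in contexts:
--         s = context.lower()
--         for i in range(len(s)):
--             for w in _BY_FIRST.get(s[i], ()):
--                 if s.startswith(w, i):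
--                     return True
--     return False
-- ===== Notes on version B (the rewrite author's own statement) =====
-- stated objective: alternative
-- what changed: A loops over the indicator set doing a full substring search per indicator; B scans each lowered context once, position by position, consulting a first-letter dispatch dict built once so only the (at most two) indicators starting with the current character are prefix-tested.
import Mathlib
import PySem

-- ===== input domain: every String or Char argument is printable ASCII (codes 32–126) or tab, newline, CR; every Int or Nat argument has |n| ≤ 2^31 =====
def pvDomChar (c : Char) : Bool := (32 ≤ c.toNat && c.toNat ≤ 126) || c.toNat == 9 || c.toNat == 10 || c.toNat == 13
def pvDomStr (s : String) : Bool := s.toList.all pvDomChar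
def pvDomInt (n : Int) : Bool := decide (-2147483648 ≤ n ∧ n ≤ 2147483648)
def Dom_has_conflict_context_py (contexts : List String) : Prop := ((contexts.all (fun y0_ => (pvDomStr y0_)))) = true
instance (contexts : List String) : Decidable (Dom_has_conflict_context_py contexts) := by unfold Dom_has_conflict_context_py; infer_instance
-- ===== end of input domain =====

-- B replaces A's per-indicator substring loop with a single positional scan per context using a first-letter dispatch dict built once (alternative decomposition; same result).


-- ===== PORT A =====
-- the set literal 'conflict_indicators' (a Python set of distinct string literals)
def pyA_conflict_indicators : List String :=
  PySem.Set.ofList ["conflict", "violence", "attack", "war", "crisis", "emergency",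
                    "security", "threat", "danger", "instability", "unrest"]

-- 'for context in contexts: … if any(indicator in context_lower …): return True' / 'return False'
def has_conflict_context_py : List String → Bool
  | [] => false
  | context :: rest =>
      let context_lower := PySem.Str.lower context
      if pyA_conflict_indicators.any (fun indicator => PySem.Str.isIn indicator context_lower) then
        true
      else
        has_conflict_context_py rest

-- ===== PORT B =====
-- the tuple _CONFLICT_WORDS (words kept as char lists)
def pyB_words : List (List Char) :=
  ["conflict", "violence", "attack", "war", "crisis", "emergency",
   "security", "threat", "danger", "instability", "unrest"].map String.toList

-- the module-level build loop: _BY_FIRST.setdefault(_w[0], []).append(_w)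
def pyB_byFirst : PySem.Dict Char (List (List Char)) :=
  pyB_words.foldl (fun d w => d.modify (w.headD ' ') [] (· ++ [w])) PySem.Dict.empty

-- 'for i in range(len(s)): for w in _BY_FIRST.get(s[i], ()): if s.startswith(w, i): return True'
-- (the index loop transcribed as structural recursion over the suffix starting at i)
def pyB_scan : List Char → Bool
  | [] => false
  | c :: rest =>
      if (pyB_byFirst.getD c []).any (fun w => w.isPrefixOf (c :: rest)) then true
      else pyB_scan rest

-- the outer 'for context in contexts' loop with early return
def has_conflict_context_py_alt : List String → Bool
  | [] => false
  | context :: rest =>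
      if pyB_scan (PySem.Chars.lower context.toList) then true
      else has_conflict_context_py_alt rest

-- ===== PRECONDITION & SPEC =====
def Spec_has_conflict_context_py (contexts : List String) (out : Bool) : Prop := out = has_conflict_context_py_alt contexts
instance (contexts : List String) (out : Bool) : Decidable (Spec_has_conflict_context_py contexts out) := by unfold Spec_has_conflict_context_py; infer_instance

-- ===== CLAIM (what is proved, stated in full; the proofs are below) =====
def Claim_equal_has_conflict_context_py : Prop := ∀ (contexts : List String), Dom_has_conflict_context_py contexts → Spec_has_conflict_context_py contexts (has_conflict_context_py contexts)

-- ===== LEMMAS AND PROOFS =====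

-- the dispatch bucket for c holds exactly the words whose first letter is c
theorem bucket_eq_filter (c : Char) :
    pyB_byFirst.getD c [] = pyB_words.filter (fun w => w.headD ' ' == c) := by
  unfold pyB_byFirst
  have hmap : pyB_words.foldl (fun d w => d.modify (w.headD ' ') [] (· ++ [w])) PySem.Dict.empty
      = (pyB_words.map (fun w => (w.headD ' ', w))).foldl
          (fun d p => d.modify p.1 [] (· ++ [p.2])) PySem.Dict.empty := by
    rw [List.foldl_map]
  rw [hmap, PySem.Dict.getD_foldl_modify_append, List.filter_map, List.map_map]
  simp [Function.comp_def]

theorem words_nonempty : ∀ w ∈ pyB_words, w ≠ [] := by decide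

-- per word, restricting to the bucket of the first character loses nothing at a matching position
theorem bucket_any_eq (c : Char) (rest : List Char) :
    ((pyB_byFirst.getD c []).any (fun w => w.isPrefixOf (c :: rest))) =
      (pyB_words.any (fun w => w.isPrefixOf (c :: rest))) := by
  rw [bucket_eq_filter, List.any_filter, Bool.eq_iff_iff]
  simp only [List.any_eq_true, Bool.and_eq_true, beq_iff_eq]
  constructor
  · rintro ⟨w, hw, _, hp⟩; exact ⟨w, hw, hp⟩
  · rintro ⟨w, hw, hp⟩
    refine ⟨w, hw, ?_, hp⟩
    have hne := words_nonempty w hw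
    obtain ⟨x, xs, rfl⟩ := List.exists_cons_of_ne_nil hne
    obtain ⟨t, ht⟩ := List.isPrefixOf_iff_prefix.mp hp
    simp at ht ⊢
    exact ht.1

-- the positional scan finds a match iff some word is an infix
theorem scan_eq_true_iff (s : List Char) :
    pyB_scan s = true ↔ ∃ w ∈ pyB_words, w <:+: s := by
  induction s with
  | nil =>
      simp only [pyB_scan]
      constructor
      · intro h; exact absurd h (by decide)
      · rintro ⟨w, hw, hi⟩
        have : w = [] := List.infix_nil.mp hi
        exact absurd this (words_nonempty w hw)
  | cons c rest ih =>
      simp only [pyB_scan]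
      rw [bucket_any_eq]
      split_ifs with h
      · simp only [List.any_eq_true, List.isPrefixOf_iff_prefix] at h
        obtain ⟨w, hw, hp⟩ := h
        exact iff_of_true rfl ⟨w, hw, hp.isInfix⟩
      · rw [ih]
        constructor
        · rintro ⟨w, hw, hi⟩
          exact ⟨w, hw, hi.trans ⟨[c], [], by simp⟩⟩
        · rintro ⟨w, hw, hi⟩
          rcases List.infix_cons_iff.mp hi with hp | hi'
          · exfalso; apply h
            exact List.any_eq_true.mpr ⟨w, hw, List.isPrefixOf_iff_prefix.mpr hp⟩
          · exact ⟨w, hw, hi'⟩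

-- per context, A's indicator loop and B's dispatch scan agree
theorem per_context_eq (context : String) :
    (pyA_conflict_indicators.any
        (fun indicator => PySem.Str.isIn indicator (PySem.Str.lower context))) =
      pyB_scan (PySem.Chars.lower context.toList) := by
  rw [Bool.eq_iff_iff, scan_eq_true_iff]
  have hset : pyA_conflict_indicators =
      ["conflict", "violence", "attack", "war", "crisis", "emergency",
       "security", "threat", "danger", "instability", "unrest"] := by decide
  rw [hset]
  simp only [List.any_eq_true, PySem.Str.isIn_iff_infix, PySem.Str.toList_lower, pyB_words]
  constructor
  · rintro ⟨i, hi, h⟩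
    exact ⟨i.toList, List.mem_map_of_mem hi, h⟩
  · rintro ⟨w, hw, h⟩
    obtain ⟨i, hi, rfl⟩ := List.mem_map.mp hw
    exact ⟨i, hi, h⟩

theorem ports_agree (contexts : List String) :
    has_conflict_context_py contexts = has_conflict_context_py_alt contexts := by
  induction contexts with
  | nil => rfl
  | cons c rest ih =>
      simp only [has_conflict_context_py, has_conflict_context_py_alt]
      rw [per_context_eq c]
      split_ifs with h
      · rfl
      · exact ih

-- ===== VERDICT (by name: the statement is the Claim_ definition above) =====
theorem has_conflict_context_py_spec : Claim_equal_has_conflict_context_py := by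
  intro contexts _
  exact ports_agree contexts
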